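-- pv_equiv track=rewrite | github.com/rebeckao/AdventOfCode2021 | challenges/day_15_chiton.py | build_large_map
-- ===== SOURCE A (Python) =====
-- def build_large_map(cave_map, original_x_length, original_y_length):
--     large_cave_map = []
--     for y_round in range(0, 5):
--         for y_in_map in range(0, original_y_length):
--             row = y_round * original_y_length + y_in_map
--             large_cave_map.append("")
--             for x_round in range(0, 5):
--                 for x_in_map in range(0, original_x_length):
--                     col = x_round * original_x_length + x_in_map
--                     large_cave_map[row] += str(risk_at_location(cave_map, col, row, original_x_length, original_y_length))
--     return large_cave_map
--
-- def risk_at_location(cave_map, x, y, x_length, y_length):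
--     x_increase = int(x / x_length)
--     y_increase = int(y / y_length)
--     x_pos_in_map = x % x_length
--     y_pos_in_map = y % y_length
--     value_in_original_map = int(cave_map[y_pos_in_map][x_pos_in_map])
--     increased_value = value_in_original_map + x_increase + y_increase
--     modulated_value = ((increased_value - 1) % 9) + 1
--     return modulated_value
-- ===== SOURCE B (Python) =====
-- def build_large_map(cave_map, original_x_length, original_y_length):
--     base = [[int(cave_map[yy][xx]) for xx in range(original_x_length)]
--             for yy in range(original_y_length)]
--     shifted = [["".join(str((v - 1 + s) % 9 + 1) for v in row) for row in base]
--                for s in range(9)]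
--     return ["".join(shifted[x_round + y_round][row_idx] for x_round in range(5))
--             for y_round in range(5) for row_idx in range(len(base))]
-- ===== Notes on version B (the rewrite author's own statement) =====
-- stated objective: alternative
-- what changed: B parses the original map once, precomputes the 9 possible shifted string renderings of each base row, and assembles every large-map row by concatenating five precomputed strings, instead of recomputing each cell from its global coordinates with division/modulo via risk_at_location.
import Mathlib
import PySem

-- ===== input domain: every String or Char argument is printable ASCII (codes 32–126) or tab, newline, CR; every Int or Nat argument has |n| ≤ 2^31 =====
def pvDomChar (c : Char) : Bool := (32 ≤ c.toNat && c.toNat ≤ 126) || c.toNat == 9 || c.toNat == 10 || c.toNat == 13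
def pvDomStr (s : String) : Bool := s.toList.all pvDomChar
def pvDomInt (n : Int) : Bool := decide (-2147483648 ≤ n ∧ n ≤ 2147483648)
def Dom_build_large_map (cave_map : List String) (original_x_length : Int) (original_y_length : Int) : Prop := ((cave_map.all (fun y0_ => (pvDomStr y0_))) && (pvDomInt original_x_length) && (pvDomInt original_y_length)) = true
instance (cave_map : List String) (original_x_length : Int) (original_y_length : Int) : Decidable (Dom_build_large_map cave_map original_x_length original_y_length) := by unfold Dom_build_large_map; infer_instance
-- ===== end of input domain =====

-- B precomputes the 9 possible shifted renderings of each base row once and assembles the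
-- large map by concatenating those precomputed row strings, instead of recomputing every
-- cell from its global coordinates; objective: alternative decomposition, same cost class.

-- ===== PORT A =====
-- int(x / x_length) is true division followed by int() truncation; on the arguments this
-- port is ever applied to inside Pre_ (0 ≤ x < 5*x_length ≤ 5*2^31) that equals floor
-- division exactly, which is how it is ported here.
def risk_at_location (cave_map : List String) (x : Int) (y : Int) (x_length : Int) (y_length : Int) : Int :=
  let x_increase := PySem.Int.floordiv x x_length
  let y_increase := PySem.Int.floordiv y y_length
  let x_pos_in_map := PySem.Int.mod x x_length
  let y_pos_in_map := PySem.Int.mod y y_length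
  let value_in_original_map :=
    (PySem.Int.ofChars? [(PySem.Str.pyGet? (PySem.List.pyGetD cave_map y_pos_in_map "") x_pos_in_map).getD ' ']).getD 0
  let increased_value := value_in_original_map + x_increase + y_increase
  PySem.Int.mod (increased_value - 1) 9 + 1

def build_large_map (cave_map : List String) (original_x_length : Int) (original_y_length : Int) : List String :=
  (PySem.List.pyRange 0 5 1).foldl (fun acc y_round =>
    (PySem.List.pyRange 0 original_y_length 1).foldl (fun acc y_in_map =>
      let row := y_round * original_y_length + y_in_map
      let acc := acc ++ [""]
      (PySem.List.pyRange 0 5 1).foldl (fun acc x_round =>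
        (PySem.List.pyRange 0 original_x_length 1).foldl (fun acc x_in_map =>
          let col := x_round * original_x_length + x_in_map
          acc.set row.toNat (acc.getD row.toNat "" ++
            PySem.Int.toStr (risk_at_location cave_map col row original_x_length original_y_length))) acc) acc) acc) []

-- ===== PORT B =====
def build_large_map_alt (cave_map : List String) (original_x_length : Int) (original_y_length : Int) : List String :=
  let base : List (List Int) :=
    (PySem.List.pyRange 0 original_y_length 1).map (fun yy =>
      (PySem.List.pyRange 0 original_x_length 1).map (fun xx =>
        (PySem.Int.ofChars? [(PySem.Str.pyGet? (PySem.List.pyGetD cave_map yy "") xx).getD ' ']).getD 0))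
  let shifted : List (List String) :=
    (PySem.List.pyRange 0 9 1).map (fun s =>
      base.map (fun r => PySem.Str.join "" (r.map (fun v => PySem.Int.toStr (PySem.Int.mod (v - 1 + s) 9 + 1)))))
  (PySem.List.pyRange 0 5 1).flatMap (fun y_round =>
    (PySem.List.pyRange 0 (base.length : Int) 1).map (fun row_idx =>
      PySem.Str.join "" ((PySem.List.pyRange 0 5 1).map (fun x_round =>
        PySem.List.pyGetD (PySem.List.pyGetD shifted (x_round + y_round) []) row_idx ""))))

-- ===== PRECONDITION & SPEC =====
-- Pre_ excludes exactly the inputs where Python A raises: when both lengths are positive the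
-- first original_y_length rows must exist, be at least original_x_length long, and hold only
-- digits in their first original_x_length characters (otherwise IndexError/ValueError).
def Pre_build_large_map (cave_map : List String) (original_x_length : Int) (original_y_length : Int) : Prop :=
  0 < original_x_length → 0 < original_y_length →
    original_y_length.toNat ≤ cave_map.length ∧
    ∀ s ∈ cave_map.take original_y_length.toNat,
      original_x_length.toNat ≤ s.toList.length ∧
      (s.toList.take original_x_length.toNat).all (fun c => 48 ≤ c.toNat && c.toNat ≤ 57) = true
instance (cave_map : List String) (original_x_length : Int) (original_y_length : Int) : Decidable (Pre_build_large_map cave_map original_x_length original_y_length) := by unfold Pre_build_large_map; infer_instance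

def pvWitness_build_large_map : List String × Int × Int := (["19", "28"], 2, 2)

def Spec_build_large_map (cave_map : List String) (original_x_length : Int) (original_y_length : Int) (out : List String) : Prop := out = build_large_map_alt cave_map original_x_length original_y_length
instance (cave_map : List String) (original_x_length : Int) (original_y_length : Int) (out : List String) : Decidable (Spec_build_large_map cave_map original_x_length original_y_length out) := by unfold Spec_build_large_map; infer_instance

-- ===== CLAIM (what is proved, stated in full; the proofs are below) =====
def Claim_equal_build_large_map : Prop := ∀ (cave_map : List String) (original_x_length : Int) (original_y_length : Int), Dom_build_large_map cave_map original_x_length original_y_length → Pre_build_large_map cave_map original_x_length original_y_length → Spec_build_large_map cave_map original_x_length original_y_length (build_large_map cave_map original_x_length original_y_length)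

-- ===== LEMMAS AND PROOFS =====

lemma pv_join_cons (x : String) (l : List String) :
    PySem.Str.join "" (x :: l) = x ++ PySem.Str.join "" l := by
  cases l with
  | nil => simp [PySem.Str.join, PySem.Chars.join, List.intercalate]
  | cons y t =>
    simp [PySem.Str.join, PySem.Chars.join, List.intercalate, List.intersperse_cons₂]

-- the string to which A's two inner loops grow row number `row`
def pvRowStr (cave_map : List String) (ox oy row : Int) : String :=
  PySem.Str.join "" ((PySem.List.pyRange 0 5 1).map (fun xr =>
    PySem.Str.join "" ((PySem.List.pyRange 0 ox 1).map (fun xi =>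
      PySem.Int.toStr (risk_at_location cave_map (xr * ox + xi) row ox oy)))))

-- growing a string via set at the last position is appending
lemma pv_set_fold (g : Int → String) (xs : List Int) (d : List String) (c : String) :
    xs.foldl (fun acc x => acc.set d.length (acc.getD d.length "" ++ g x)) (d ++ [c])
      = d ++ [c ++ PySem.Str.join "" (xs.map g)] := by
  induction xs generalizing c with
  | nil => simp [PySem.Str.join, PySem.Chars.join, List.intercalate]
  | cons x xs ih =>
    have h1 : (d ++ [c]).getD d.length "" = c := by simp [List.getD]
    have h2 : (d ++ [c]).set d.length (c ++ g x) = d ++ [c ++ g x] := by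
      rw [List.set_append_right _ _ (Nat.le_refl _)]
      simp
    simp only [List.foldl_cons, h1, h2, ih, List.map_cons, pv_join_cons, String.append_assoc]

-- both inner loops of A collapse to one appended row string
lemma pv_set_fold2 (g : Int → Int → String) (xrs xis : List Int) (d : List String) (c : String) :
    xrs.foldl (fun acc xr =>
        xis.foldl (fun acc2 xi => acc2.set d.length (acc2.getD d.length "" ++ g xr xi)) acc)
      (d ++ [c])
      = d ++ [c ++ PySem.Str.join "" (xrs.map (fun xr => PySem.Str.join "" (xis.map (g xr))))] := by
  induction xrs generalizing c with
  | nil => simp [PySem.Str.join, PySem.Chars.join, List.intercalate]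
  | cons xr xrs ih =>
    simp only [List.foldl_cons, pv_set_fold, ih, List.map_cons, pv_join_cons, String.append_assoc]

-- A's middle loop (over y_in_map) appends the fully formed row strings
lemma pv_middle_fold (cave_map : List String) (ox : Int) (Y : Nat) (yr : Int) (n : Nat)
    (acc : List String) (h : ∀ k : Nat, k < n → (yr * (Y:Int) + (k : Int)).toNat = acc.length + k) :
    (List.range n).foldl (fun acc (k : Nat) =>
        (PySem.List.pyRange 0 5 1).foldl (fun a xr =>
          (PySem.List.pyRange 0 ox 1).foldl (fun a2 xi =>
            a2.set (yr * (Y:Int) + (k:Int)).toNat ((a2.getD (yr * (Y:Int) + (k:Int)).toNat "") ++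
              PySem.Int.toStr (risk_at_location cave_map (xr * ox + xi) (yr * (Y:Int) + (k:Int)) ox (Y:Int)))) a)
          (acc ++ [""])) acc
      = acc ++ (List.range n).map (fun (k : Nat) => pvRowStr cave_map ox (Y:Int) (yr * (Y:Int) + (k:Int))) := by
  induction n with
  | zero => simp
  | succ n ih =>
    rw [List.range_succ, List.foldl_append, List.map_append,
        ih (fun k hk => h k (Nat.lt_succ_of_lt hk))]
    have hd : (yr * (Y:Int) + (n:Int)).toNat
        = (acc ++ (List.range n).map (fun (k : Nat) => pvRowStr cave_map ox (Y:Int) (yr * (Y:Int) + (k:Int)))).length := by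
      simp [h n (Nat.lt_succ_self n)]
    simp only [List.foldl_cons, List.foldl_nil, hd, pv_set_fold2]
    simp [pvRowStr]

def pvBlock (cave_map : List String) (ox : Int) (Y : Nat) (j : Nat) : List String :=
  (List.range Y).map (fun (k : Nat) => pvRowStr cave_map ox (Y:Int) ((j:Int) * (Y:Int) + (k:Int)))

lemma pv_outer' (cave_map : List String) (ox : Int) (Y M : Nat) :
    ∀ (n j : Nat) (acc : List String), M - j = n → acc.length = j * Y →
    (PySem.List.pyRange (j:Int) (M:Int) 1).foldl
      (fun acc y_round =>
        (PySem.List.pyRange 0 (Y:Int) 1).foldl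
          (fun acc y_in_map =>
            (PySem.List.pyRange 0 5 1).foldl
              (fun acc x_round =>
                (PySem.List.pyRange 0 ox 1).foldl
                  (fun acc x_in_map =>
                    acc.set (y_round * (Y:Int) + y_in_map).toNat
                      ((acc.getD (y_round * (Y:Int) + y_in_map).toNat "") ++
                        PySem.Int.toStr (risk_at_location cave_map (x_round * ox + x_in_map)
                          (y_round * (Y:Int) + y_in_map) ox (Y:Int)))) acc)
              (acc ++ [""]))
          acc)
      acc
      = acc ++ (List.range' j n).flatMap (pvBlock cave_map ox Y) := by
  intro n
  induction n with
  | zero =>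
    intro j acc hn _
    rw [PySem.List.pyRange_one_eq_nil (a:=(j:Int)) (b:=(M:Int)) (by exact_mod_cast (by omega : (M:Int) ≤ (j:Int)))]
    simp
  | succ n ih =>
    intro j acc hn hacc
    rw [PySem.List.pyRange_one_cons (a:=(j:Int)) (b:=(M:Int)) (by exact_mod_cast (by omega : (j:Int) < (M:Int)))]
    rw [List.foldl_cons]
    have hmid :
        (PySem.List.pyRange 0 (Y:Int) 1).foldl
          (fun acc y_in_map =>
            (PySem.List.pyRange 0 5 1).foldl
              (fun acc x_round =>
                (PySem.List.pyRange 0 ox 1).foldl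
                  (fun acc x_in_map =>
                    acc.set ((j:Int) * (Y:Int) + y_in_map).toNat
                      ((acc.getD ((j:Int) * (Y:Int) + y_in_map).toNat "") ++
                        PySem.Int.toStr (risk_at_location cave_map (x_round * ox + x_in_map)
                          ((j:Int) * (Y:Int) + y_in_map) ox (Y:Int)))) acc)
              (acc ++ [""]))
          acc
        = acc ++ pvBlock cave_map ox Y j := by
      rw [PySem.List.pyRange_zero_natCast, List.foldl_map]
      exact pv_middle_fold cave_map ox Y (j:Int) Y acc (by intro k hk; omega)
    rw [hmid, List.range'_succ, List.flatMap_cons, ← List.append_assoc]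
    exact ih (j+1) _ (by omega) (by simp [pvBlock, hacc, Nat.succ_mul])

-- A computes the five blocks of rows in order
lemma pv_A_eq (cave_map : List String) (ox : Int) (Y : Nat) :
    build_large_map cave_map ox (Y:Int)
      = (List.range 5).flatMap (pvBlock cave_map ox Y) := by
  have h := pv_outer' cave_map ox Y 5 5 0 [] rfl (by simp)
  rw [List.range_eq_range']
  exact h

-- B's precomputed tables, named for the proofs
def pvBase (cave_map : List String) (ox : Int) (Y : Nat) : List (List Int) :=
  (PySem.List.pyRange 0 (Y:Int) 1).map (fun yy =>
    (PySem.List.pyRange 0 ox 1).map (fun xx =>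
      (PySem.Int.ofChars? [(PySem.Str.pyGet? (PySem.List.pyGetD cave_map yy "") xx).getD ' ']).getD 0))

def pvShifted (cave_map : List String) (ox : Int) (Y : Nat) : List (List String) :=
  (PySem.List.pyRange 0 9 1).map (fun s =>
    (pvBase cave_map ox Y).map (fun r =>
      PySem.Str.join "" (r.map (fun v => PySem.Int.toStr (PySem.Int.mod (v - 1 + s) 9 + 1)))))

-- B assembles the same five blocks from its precomputed tables
lemma pv_alt_eq (cave_map : List String) (ox : Int) (Y : Nat) :
    build_large_map_alt cave_map ox (Y:Int)
      = (List.range 5).flatMap (fun (j : Nat) =>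
          (List.range Y).map (fun (k : Nat) =>
            PySem.Str.join "" ((PySem.List.pyRange 0 5 1).map (fun xr =>
              PySem.List.pyGetD (PySem.List.pyGetD (pvShifted cave_map ox Y) (xr + (j:Int)) []) ((k:Int)) "")))) := by
  have hb : (pvBase cave_map ox Y).length = Y := by
    simp [pvBase, PySem.List.length_pyRange_one]
  have h5 : PySem.List.pyRange 0 5 1 = (List.range 5).map (fun (k : Nat) => (k:Int)) := by decide
  show (PySem.List.pyRange 0 5 1).flatMap (fun y_round =>
      (PySem.List.pyRange 0 ((pvBase cave_map ox Y).length : Int) 1).map (fun row_idx =>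
        PySem.Str.join "" ((PySem.List.pyRange 0 5 1).map (fun x_round =>
          PySem.List.pyGetD (PySem.List.pyGetD (pvShifted cave_map ox Y) (x_round + y_round) []) row_idx "")))) = _
  rw [hb]
  conv_lhs => rw [h5, List.flatMap_map]
  rw [PySem.List.pyRange_zero_natCast]
  simp only [List.map_map]
  rfl

-- core: B's lookup row equals the row A grows, cell by cell
lemma pv_row_eq (cave_map : List String) (ox : Int) (Y : Nat) (j k : Nat)
    (hj : j < 5) (hk : k < Y) :
    PySem.Str.join "" ((PySem.List.pyRange 0 5 1).map (fun xr =>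
        PySem.List.pyGetD (PySem.List.pyGetD (pvShifted cave_map ox Y) (xr + (j:Int)) []) ((k:Int)) ""))
      = pvRowStr cave_map ox (Y:Int) ((j:Int) * (Y:Int) + (k:Int)) := by
  unfold pvRowStr
  refine congrArg _ (List.map_congr_left ?_)
  intro xr hxr
  rw [PySem.List.mem_pyRange_one] at hxr
  obtain ⟨hxr0, hxr5⟩ := hxr
  rw [pvShifted]
  rw [PySem.List.pyGetD_map_pyRange_of_nonneg _ _ _ _ (by omega) (by omega)]
  rw [pvBase, List.map_map]
  rw [PySem.List.pyGetD_map_pyRange_of_nonneg _ _ _ _ (by positivity) (by exact_mod_cast hk)]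
  simp only [Function.comp, List.map_map]
  refine congrArg _ (List.map_congr_left ?_)
  intro xi hxi
  rw [PySem.List.mem_pyRange_one] at hxi
  obtain ⟨hxi0, hxiox⟩ := hxi
  have hox : 0 < ox := by omega
  have hY0 : (0:Int) < (Y:Int) := by exact_mod_cast (by omega : 0 < Y)
  have hkY : ((k:Int)) < (Y:Int) := by exact_mod_cast hk
  have hfx : PySem.Int.floordiv (xr * ox + xi) ox = xr := by
    rw [PySem.Int.floordiv_eq_iff_of_pos hox]
    constructor <;> nlinarith
  have hmx : PySem.Int.mod (xr * ox + xi) ox = xi := by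
    rw [PySem.Int.mod_eq_emod_of_pos hox, show xr * ox + xi = xi + ox * xr by ring,
        Int.add_mul_emod_self_left, Int.emod_eq_of_lt hxi0 hxiox]
  have hfy : PySem.Int.floordiv ((j:Int) * (Y:Int) + (k:Int)) (Y:Int) = (j:Int) := by
    rw [PySem.Int.floordiv_eq_iff_of_pos hY0]
    constructor <;> nlinarith [Int.natCast_nonneg k]
  have hmy : PySem.Int.mod ((j:Int) * (Y:Int) + (k:Int)) (Y:Int) = (k:Int) := by
    rw [PySem.Int.mod_eq_emod_of_pos hY0, show (j:Int) * (Y:Int) + (k:Int) = (k:Int) + (Y:Int) * (j:Int) by ring,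
        Int.add_mul_emod_self_left, Int.emod_eq_of_lt (by positivity) hkY]
  simp only [Function.comp_apply]
  have hv : risk_at_location cave_map (xr * ox + xi) ((j:Int) * (Y:Int) + (k:Int)) ox (Y:Int)
      = PySem.Int.mod ((PySem.Int.ofChars? [(PySem.Str.pyGet? (PySem.List.pyGetD cave_map ((k:Int)) "") xi).getD ' ']).getD 0 + xr + (j:Int) - 1) 9 + 1 := by
    unfold risk_at_location
    rw [hfx, hmx, hfy, hmy]
  rw [hv, show ∀ v : Int, v - 1 + (xr + (j:Int)) = v + xr + (j:Int) - 1 from fun v => by ring]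

-- ===== VERDICT (by name: the statement is the Claim_ definition above) =====
theorem build_large_map_spec : Claim_equal_build_large_map := by
  intro cave_map ox oy _ _
  unfold Spec_build_large_map
  by_cases hoy : 0 < oy
  · obtain ⟨Y, rfl⟩ : ∃ Y : Nat, oy = (Y:Int) := ⟨oy.toNat, (Int.toNat_of_nonneg hoy.le).symm⟩
    rw [pv_A_eq, pv_alt_eq]
    refine List.flatMap_congr ?_
    intro j hj
    rw [List.mem_range] at hj
    unfold pvBlock
    refine List.map_congr_left ?_
    intro k hk
    rw [List.mem_range] at hk
    exact (pv_row_eq cave_map ox Y j k hj hk).symm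
  · have hnil : PySem.List.pyRange 0 oy 1 = [] := PySem.List.pyRange_one_eq_nil (by omega)
    have h5 : PySem.List.pyRange (0:Int) 5 1 = [0,1,2,3,4] := by decide
    simp [build_large_map, build_large_map_alt, hnil, h5]
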